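-- pv_equiv track=rewrite | github.com/miliar/Code_Jam_Webscraper | Solutions_python/Problem_97/1505.py | calculate
-- ===== SOURCE A (Python) =====
-- def calculate(low, high):
--     matches = 0
--
--     while low<high:
--         low_str = str(low)
--         for i in range (1, len(low_str)):
--             modified = ''.join([low_str[-i:], low_str[:-i]])
--             #print low, high, modified
--             modified_str = str(int(modified))
--             if int(modified) == high and len(modified_str) == len(str(high)) and len(modified_str) == len(low_str):
--                 matches += 1
--         low += 1
--
--     return matches
-- ===== SOURCE B (Python) =====
-- def calculate(low, high):
--     if low >= high:
--         return 0
--     # d = number of decimal digits of high, p = 10**d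
--     d, p = 1, 10
--     while p <= high:
--         d, p = d + 1, p * 10
--     count = 0
--     q = 1
--     for _ in range(1, d):
--         q *= 10
--         r = p // q              # 10**(d-i) where q = 10**i
--         n = (high % r) * q + high // r   # rotate the digit string of high left by i
--         if n >= p // 10 and low <= n < high:
--             count += 1
--     return count
-- ===== Notes on version B (the rewrite author's own statement) =====
-- stated objective: faster
-- what changed: Instead of scanning every value in [low, high) and string-rotating each one, B generates the at most d-1 digit-rotations of high arithmetically (div/mod by powers of 10) and counts those that are d-digit numbers in [low, high).
import Mathlib
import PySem

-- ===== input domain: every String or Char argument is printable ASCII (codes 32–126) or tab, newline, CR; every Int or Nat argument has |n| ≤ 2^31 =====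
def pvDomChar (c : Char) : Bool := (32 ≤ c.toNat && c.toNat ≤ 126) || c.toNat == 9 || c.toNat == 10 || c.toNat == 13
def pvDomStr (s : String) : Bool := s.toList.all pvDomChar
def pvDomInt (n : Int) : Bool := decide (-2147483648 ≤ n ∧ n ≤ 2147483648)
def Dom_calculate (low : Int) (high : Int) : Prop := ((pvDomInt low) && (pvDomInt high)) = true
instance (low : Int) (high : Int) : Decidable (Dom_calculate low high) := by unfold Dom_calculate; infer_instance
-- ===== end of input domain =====

-- B replaces A's scan of every value in [low, high) by generating the ≤ d-1 arithmetic
-- digit-rotations of high and counting those that are d-digit numbers in [low, high): faster (asymptotic).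


-- ===== PORT A =====
-- hand port of Python's int(s): exact for the nonempty all-decimal-digit strings that
-- `modified` is whenever low ≥ 0 (on other inputs Python's int raises ValueError; those
-- runs — low < 0 < high - low — are excluded by Pre_calculate).
def pvDigitsInt (cs : List Char) : Int :=
  cs.foldl (fun a c => 10 * a + ((c.toNat : Int) - 48)) 0

-- the inner 'for i in range(1, len(low_str))' loop of A
def calcInner (s : List Char) (high : Int) (acc : Int) : Int :=
  (PySem.List.pyRange 1 (s.length : Int) 1).foldl (fun m i =>
    let modified := PySem.List.slice s (some (-i)) none ++ PySem.List.slice s none (some (-i))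
    let v := pvDigitsInt modified
    let modifiedStr := PySem.Int.toChars v
    if v = high ∧ modifiedStr.length = (PySem.Int.toChars high).length ∧
        modifiedStr.length = s.length then m + 1 else m) acc

-- the outer 'while low < high' loop of A
def calcLoop (low high matchs : Int) : Int :=
  if low < high then
    calcLoop (low + 1) high (calcInner (PySem.Int.toChars low) high matchs)
  else matchs
termination_by (high - low).toNat
decreasing_by omega

def calculate (low : Int) (high : Int) : Int := calcLoop low high 0

-- ===== PORT B =====
-- 'while p <= high: d, p = d + 1, p * 10' (the 0 < p argument is only the termination guard)
def dpLoop (high d p : Int) (hp : 0 < p) : Int × Int :=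
  if p ≤ high then dpLoop high (d + 1) (p * 10) (by positivity) else (d, p)
termination_by (high + 1 - p).toNat
decreasing_by omega

def calculate_alt (low : Int) (high : Int) : Int :=
  if low ≥ high then 0
  else
    let dp := dpLoop high 1 10 (by norm_num)
    let d := dp.1
    let p := dp.2
    ((PySem.List.pyRange 1 d 1).foldl (fun st _ =>
      let q := st.2 * 10
      let r := PySem.Int.floordiv p q
      let n := (PySem.Int.mod high r) * q + PySem.Int.floordiv high r
      (if n ≥ PySem.Int.floordiv p 10 ∧ low ≤ n ∧ n < high then st.1 + 1 else st.1, q))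
      ((0 : Int), (1 : Int))).1

-- ===== PRECONDITION & SPEC =====
-- Pre_ excludes exactly the inputs (low < 0 and low < high) on which A raises ValueError:
-- int() is applied to a rotation of str(low) that carries '-' in the middle.
def Pre_calculate (low : Int) (high : Int) : Prop := 0 ≤ low ∨ high ≤ low
instance (low : Int) (high : Int) : Decidable (Pre_calculate low high) := by
  unfold Pre_calculate; infer_instance

def pvWitness_calculate : Int × Int := (12, 21)

def Spec_calculate (low : Int) (high : Int) (out : Int) : Prop := out = calculate_alt low high
instance (low : Int) (high : Int) (out : Int) : Decidable (Spec_calculate low high out) := by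
  unfold Spec_calculate; infer_instance

-- ===== CLAIM (what is proved, stated in full; the proofs are below) =====
def Claim_equal_calculate : Prop := ∀ (low : Int) (high : Int), Dom_calculate low high →
  Pre_calculate low high → Spec_calculate low high (calculate low high)

-- ===== LEMMAS AND PROOFS =====

def valN (cs : List Char) : ℕ := cs.foldl (fun a c => 10 * a + (c.toNat - 48)) 0

theorem valN_from (cs : List Char) : ∀ a : ℕ,
    cs.foldl (fun a c => 10 * a + (c.toNat - 48)) a = a * 10 ^ cs.length + valN cs := by
  induction cs with
  | nil => intro a; simp [valN]
  | cons c t ih =>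
    intro a
    simp only [List.foldl_cons, List.length_cons, valN] at *
    rw [ih, ih (10 * 0 + (c.toNat - 48))]
    ring

theorem valN_append (xs ys : List Char) :
    valN (xs ++ ys) = valN xs * 10 ^ ys.length + valN ys := by
  unfold valN
  rw [List.foldl_append, valN_from]
  rfl

theorem valN_lt (cs : List Char) (h : ∀ c ∈ cs, c.toNat ≤ 57) :
    valN cs < 10 ^ cs.length := by
  induction cs with
  | nil => simp [valN]
  | cons c t ih =>
    have hc : c.toNat - 48 ≤ 9 := by have := h c (by simp); omega
    have ht := ih (fun x hx => h x (by simp [hx]))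
    show valN (c :: t) < 10 ^ (t.length + 1)
    have : valN (c :: t) = (c.toNat - 48) * 10 ^ t.length + valN t := by
      show List.foldl _ _ (c :: t) = _
      simp only [List.foldl_cons]
      rw [valN_from]
      show (10 * 0 + (c.toNat - 48)) * 10 ^ t.length + valN t = _
      ring_nf
    rw [this, pow_succ]
    nlinarith

theorem digitChar_toNat (d : ℕ) (h : d < 10) : (Nat.digitChar d).toNat = 48 + d := by
  interval_cases d <;> rfl

theorem mem_toDigits_bounds (m : ℕ) (c : Char) (h : c ∈ Nat.toDigits 10 m) :
    48 ≤ c.toNat ∧ c.toNat ≤ 57 := by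
  have hd := Nat.isDigit_of_mem_toDigits (by norm_num) (by norm_num) h
  simp [Char.isDigit] at hd
  exact ⟨hd.1, hd.2⟩

theorem valN_toDigits (m : ℕ) : valN (Nat.toDigits 10 m) = m := by
  induction m using Nat.strong_induction_on with
  | _ m ih =>
    rcases lt_or_ge m 10 with hm | hm
    · rw [Nat.toDigits_of_lt_base hm]
      unfold valN
      simp [digitChar_toNat m hm]
    · rw [Nat.toDigits_of_base_le (by norm_num) hm]
      rw [valN_append, ih (m / 10) (by omega)]
      have h10 : m % 10 < 10 := Nat.mod_lt _ (by norm_num)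
      unfold valN
      simp [digitChar_toNat _ h10]
      omega

theorem lenD_le_iff (m k : ℕ) (hk : 0 < k) :
    (Nat.toDigits 10 m).length ≤ k ↔ m < 10 ^ k :=
  Nat.length_toDigits_le_iff (by norm_num) hk

theorem lenD_eq_of (m d : ℕ) (hd : 0 < d) (h1 : 10 ^ (d - 1) ≤ m) (h2 : m < 10 ^ d) :
    (Nat.toDigits 10 m).length = d := by
  have hle : (Nat.toDigits 10 m).length ≤ d := (lenD_le_iff m d hd).2 h2
  by_cases h1d : d = 1
  · subst h1d
    have := Nat.length_toDigits_pos (b := 10) (n := m)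
    omega
  · have hd2 : 2 ≤ d := by omega
    have : ¬ ((Nat.toDigits 10 m).length ≤ d - 1) := by
      rw [lenD_le_iff m (d-1) (by omega)]
      omega
    omega

theorem lenD_ge_pow (m d : ℕ) (hd : 2 ≤ d) (h : (Nat.toDigits 10 m).length = d) :
    10 ^ (d - 1) ≤ m ∧ m < 10 ^ d := by
  constructor
  · by_contra hc
    have := (lenD_le_iff m (d-1) (by omega)).2 (by omega)
    omega
  · exact (lenD_le_iff m d (by omega)).1 (by omega)

def rotE (e m i : ℕ) : ℕ := (m % 10 ^ i) * 10 ^ (e - i) + m / 10 ^ i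

theorem div_mod_split (u v s : ℕ) (hv : v < 10 ^ s) :
    (u * 10 ^ s + v) / 10 ^ s = u ∧ (u * 10 ^ s + v) % 10 ^ s = v := by
  constructor
  · rw [Nat.add_comm, Nat.add_mul_div_right _ _ ((by positivity : 0 < 10 ^ s)),
      Nat.div_eq_of_lt hv]
    omega
  · rw [Nat.add_comm, Nat.add_mul_mod_self_right, Nat.mod_eq_of_lt hv]

theorem rotE_lt (e m i : ℕ) (hi : i ≤ e) (hm : m < 10 ^ e) : rotE e m i < 10 ^ e := by
  have h1 : m % 10 ^ i < 10 ^ i := Nat.mod_lt _ (by positivity)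
  have h2 : m / 10 ^ i < 10 ^ (e - i) := by
    rw [Nat.div_lt_iff_lt_mul (by positivity)]
    calc m < 10 ^ e := hm
    _ = 10 ^ (e - i) * 10 ^ i := by rw [← pow_add]; congr 1; omega
  have he : 10 ^ i * 10 ^ (e - i) = 10 ^ e := by rw [← pow_add]; congr 1; omega
  unfold rotE
  calc (m % 10 ^ i) * 10 ^ (e - i) + m / 10 ^ i
      < (m % 10 ^ i) * 10 ^ (e - i) + 10 ^ (e - i) := by omega
    _ = (m % 10 ^ i + 1) * 10 ^ (e - i) := by ring
    _ ≤ 10 ^ i * 10 ^ (e - i) := Nat.mul_le_mul_right _ (by omega)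
    _ = 10 ^ e := he

theorem rotE_pair (d i m h : ℕ) (h1 : 1 ≤ i) (h2 : i < d)
    (hm2 : m < 10 ^ d) (hh2 : h < 10 ^ d) :
    rotE d m i = h ↔ rotE d h (d - i) = m := by
  have hposi : 0 < 10 ^ i := (by positivity)
  have hposdi : 0 < 10 ^ (d - i) := (by positivity)
  have hsplit : 10 ^ (d - i) * 10 ^ i = 10 ^ d := by rw [← pow_add]; congr 1; omega
  constructor
  · intro hrot
    have ha : m / 10 ^ i < 10 ^ (d - i) := by
      rw [Nat.div_lt_iff_lt_mul hposi]; omega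
    have hb : m % 10 ^ i < 10 ^ i := Nat.mod_lt _ hposi
    unfold rotE at hrot
    have hs := div_mod_split (m % 10 ^ i) (m / 10 ^ i) (d - i) ha
    rw [hrot] at hs
    unfold rotE
    rw [hs.1, hs.2]
    have : d - (d - i) = i := by omega
    rw [this]
    have hdm := Nat.div_add_mod m (10 ^ i)
    have : (m / 10 ^ i) * 10 ^ i = 10 ^ i * (m / 10 ^ i) := Nat.mul_comm _ _
    omega
  · intro hrot
    have hb' : h / 10 ^ (d - i) < 10 ^ i := by
      rw [Nat.div_lt_iff_lt_mul hposdi]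
      calc h < 10 ^ d := hh2
      _ = 10 ^ i * 10 ^ (d - i) := by rw [← pow_add]; congr 1; omega
    unfold rotE at hrot
    have hdd : d - (d - i) = i := by omega
    rw [hdd] at hrot
    have hs := div_mod_split (h % 10 ^ (d - i)) (h / 10 ^ (d - i)) i hb'
    rw [hrot] at hs
    unfold rotE
    rw [hs.1, hs.2]
    have hdm := Nat.div_add_mod h (10 ^ (d - i))
    have : (h / 10 ^ (d - i)) * 10 ^ (d - i) = 10 ^ (d - i) * (h / 10 ^ (d - i)) := Nat.mul_comm _ _
    omega

def AcntP (h d m : ℕ) : ℕ :=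
  (List.range' 1 ((Nat.toDigits 10 m).length - 1)).countP
    (fun i => decide ((Nat.toDigits 10 m).length = d ∧
      rotE (Nat.toDigits 10 m).length m i = h))

def Bcnt (h d t : ℕ) : ℕ :=
  (List.range' 1 (d - 1)).countP
    (fun i => decide (10 ^ (d - 1) ≤ rotE d h (d - i) ∧ t ≤ rotE d h (d - i) ∧
      rotE d h (d - i) < h))

theorem countP_split {α : Type} (l : List α) (p q r : α → Bool)
    (hpq : ∀ x ∈ l, p x = (q x || r x)) (hdis : ∀ x ∈ l, ¬(q x = true ∧ r x = true)) :
    l.countP p = l.countP q + l.countP r := by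
  induction l with
  | nil => simp
  | cons a t ih =>
    rw [List.countP_cons, List.countP_cons, List.countP_cons,
      ih (fun x hx => hpq x (by simp [hx])) (fun x hx => hdis x (by simp [hx]))]
    have h1 := hpq a (by simp)
    have h2 := hdis a (by simp)
    cases hq : q a <;> cases hr : r a <;> simp [hq, hr] at h1 h2 ⊢ <;> simp [h1] <;> omega

theorem perM (h d m : ℕ) (hh : h < 10 ^ d) (hd : 1 ≤ d) :
    AcntP h d m = (List.range' 1 (d - 1)).countP
      (fun i => decide (10 ^ (d - 1) ≤ rotE d h (d - i) ∧ rotE d h (d - i) = m)) := by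
  unfold AcntP
  by_cases he : (Nat.toDigits 10 m).length = d
  · rw [he]
    apply List.countP_congr
    intro i hi
    rw [List.mem_range'] at hi
    have hi1 : 1 ≤ i := by omega
    have hi2 : i < d := by omega
    have hd2 : 2 ≤ d := by omega
    obtain ⟨hm1, hm2⟩ := lenD_ge_pow m d hd2 he
    have hp := rotE_pair d i m h hi1 hi2 hm2 hh
    simp only [decide_eq_true_eq]
    constructor
    · rintro ⟨-, hr⟩
      have := hp.1 hr
      exact ⟨by omega, this⟩
    · rintro ⟨-, hr⟩
      exact ⟨by trivial, hp.2 hr⟩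
  · have hL : (List.range' 1 ((Nat.toDigits 10 m).length - 1)).countP
        (fun i => decide ((Nat.toDigits 10 m).length = d ∧
          rotE (Nat.toDigits 10 m).length m i = h)) = 0 := by
      rw [List.countP_eq_zero]
      intro i _
      simp only [decide_eq_true_eq, not_and]
      intro h1
      exact absurd h1 he
    rw [hL]
    symm
    rw [List.countP_eq_zero]
    intro i hi
    rw [List.mem_range'] at hi
    simp only [decide_eq_true_eq, not_and]
    intro hge heq
    have hlt : rotE d h (d - i) < 10 ^ d := rotE_lt d h (d - i) (by omega) hh
    exact he (lenD_eq_of m d (by omega) (by omega) (by omega))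

theorem sum_eq_Bcnt (h d : ℕ) (hh : h < 10 ^ d) (hd : 1 ≤ d) :
    ∀ (n t : ℕ), n = h - t →
    ((List.range' t (h - t)).map (AcntP h d)).sum = Bcnt h d t := by
  intro n
  induction n with
  | zero =>
    intro t hn
    have : h - t = 0 := by omega
    rw [this]
    simp only [List.range'_zero, List.map_nil, List.sum_nil]
    symm
    unfold Bcnt
    rw [List.countP_eq_zero]
    intro i _
    simp only [decide_eq_true_eq, not_and]
    intro _ h2 h3
    omega
  | succ k ih =>
    intro t hn
    have ht : t < h := by omega
    have hrange : List.range' t (h - t) = t :: List.range' (t + 1) (h - (t + 1)) := by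
      have : h - t = (h - (t + 1)) + 1 := by omega
      rw [this, List.range'_succ]
    rw [hrange]
    simp only [List.map_cons, List.sum_cons]
    rw [ih (t + 1) (by omega)]
    rw [perM h d t hh hd]
    have hsplit : Bcnt h d t = Bcnt h d (t + 1) +
        (List.range' 1 (d - 1)).countP
          (fun i => decide (10 ^ (d - 1) ≤ rotE d h (d - i) ∧ rotE d h (d - i) = t)) := by
      unfold Bcnt
      apply countP_split
      · intro i _
        rw [Bool.eq_iff_iff]
        simp only [decide_eq_true_eq, Bool.or_eq_true]
        constructor
        · rintro ⟨a, b, c⟩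
          by_cases hrt : rotE d h (d - i) = t
          · right; exact ⟨a, hrt⟩
          · left; exact ⟨a, by omega, c⟩
        · rintro (⟨a, b, c⟩ | ⟨a, b⟩)
          · exact ⟨a, by omega, c⟩
          · exact ⟨a, by omega, by omega⟩
      · intro i _
        simp only [decide_eq_true_eq]
        rintro ⟨⟨-, b, -⟩, ⟨-, e⟩⟩
        omega
    omega

theorem pvDigitsInt_eq (cs : List Char) (h : ∀ c ∈ cs, 48 ≤ c.toNat) :
    pvDigitsInt cs = (valN cs : ℤ) := by
  suffices H : ∀ a : ℕ, cs.foldl (fun a c => 10 * a + ((c.toNat : Int) - 48)) (a : ℤ)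
      = ((cs.foldl (fun a c => 10 * a + (c.toNat - 48)) a : ℕ) : ℤ) by
    exact H 0
  induction cs with
  | nil => intro a; rfl
  | cons c t ih =>
    intro a
    simp only [List.foldl_cons]
    have hc := h c (by simp)
    have : (10 * (a:ℤ) + ((c.toNat : Int) - 48)) = ((10 * a + (c.toNat - 48) : ℕ) : ℤ) := by
      push_cast [Nat.cast_sub hc]
      ring
    rw [this, ih (fun x hx => h x (by simp [hx]))]

theorem valN_take_drop (m i : ℕ) (hi : i ≤ (Nat.toDigits 10 m).length) :
    valN ((Nat.toDigits 10 m).take ((Nat.toDigits 10 m).length - i)) = m / 10 ^ i ∧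
    valN ((Nat.toDigits 10 m).drop ((Nat.toDigits 10 m).length - i)) = m % 10 ^ i := by
  set s := Nat.toDigits 10 m with hs
  have hsplit : s = s.take (s.length - i) ++ s.drop (s.length - i) := (List.take_append_drop _ _).symm
  have hlen_drop : (s.drop (s.length - i)).length = i := by
    rw [List.length_drop]; omega
  have hdig : ∀ c ∈ s.drop (s.length - i), c.toNat ≤ 57 := by
    intro c hc
    exact (mem_toDigits_bounds m c (List.mem_of_mem_drop hc)).2
  have hlt : valN (s.drop (s.length - i)) < 10 ^ i := by
    have := valN_lt _ hdig
    rwa [hlen_drop] at this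
  have hm : valN s = m := valN_toDigits m
  have hv : valN (s.take (s.length - i)) * 10 ^ i + valN (s.drop (s.length - i)) = m := by
    conv_rhs => rw [← hm, hsplit]
    rw [valN_append, hlen_drop]
  have := div_mod_split (valN (s.take (s.length - i))) (valN (s.drop (s.length - i))) i hlt
  rw [hv] at this
  exact ⟨this.1.symm ▸ rfl, this.2.symm ▸ rfl⟩

theorem toChars_natCast (n : ℕ) : PySem.Int.toChars (n : ℤ) = Nat.toDigits 10 n := by
  simp [PySem.Int.toChars]

theorem cond_iff (m h i : ℕ) (hi1 : 1 ≤ i) (hi2 : i < (Nat.toDigits 10 m).length) :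
    let s := Nat.toDigits 10 m
    let e := s.length
    let modified := s.drop (e - i) ++ s.take (e - i)
    (pvDigitsInt modified = (h : ℤ) ∧
      (PySem.Int.toChars (pvDigitsInt modified)).length = (PySem.Int.toChars (h : ℤ)).length ∧
      (PySem.Int.toChars (pvDigitsInt modified)).length = e) ↔
    (e = (Nat.toDigits 10 h).length ∧ rotE e m i = h) := by
  intro s e modified
  have hdig : ∀ c ∈ modified, 48 ≤ c.toNat ∧ c.toNat ≤ 57 := by
    intro c hc
    rcases List.mem_append.1 hc with hc | hc
    · exact mem_toDigits_bounds m c (List.mem_of_mem_drop hc)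
    · exact mem_toDigits_bounds m c (List.mem_of_mem_take hc)
  have hval : valN modified = rotE e m i := by
    obtain ⟨htake, hdrop⟩ := valN_take_drop m i (by omega)
    have hlen : (s.take (e - i)).length = e - i := by
      rw [List.length_take]; omega
    rw [valN_append, htake, hdrop, hlen]
    rfl
  have hvI : pvDigitsInt modified = ((rotE e m i : ℕ) : ℤ) := by
    rw [pvDigitsInt_eq modified (fun c hc => (hdig c hc).1), hval]
  rw [hvI, toChars_natCast, toChars_natCast]
  constructor
  · rintro ⟨h1, _, h3⟩
    have hv : rotE e m i = h := by exact_mod_cast h1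
    rw [hv] at h3
    exact ⟨h3.symm, hv⟩
  · rintro ⟨h1, h2⟩
    rw [h2]
    exact ⟨rfl, rfl, h1 ▸ rfl⟩

theorem calcInner_foldl (s : List Char) (high : Int) :
    ∀ (l : List Int) (acc : Int),
    l.foldl (fun m i =>
      let modified := PySem.List.slice s (some (-i)) none ++ PySem.List.slice s none (some (-i))
      let v := pvDigitsInt modified
      let modifiedStr := PySem.Int.toChars v
      if v = high ∧ modifiedStr.length = (PySem.Int.toChars high).length ∧
          modifiedStr.length = s.length then m + 1 else m) acc
    = acc + (l.countP (fun i =>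
        decide (pvDigitsInt (PySem.List.slice s (some (-i)) none ++ PySem.List.slice s none (some (-i))) = high ∧
        (PySem.Int.toChars (pvDigitsInt (PySem.List.slice s (some (-i)) none ++ PySem.List.slice s none (some (-i))))).length = (PySem.Int.toChars high).length ∧
        (PySem.Int.toChars (pvDigitsInt (PySem.List.slice s (some (-i)) none ++ PySem.List.slice s none (some (-i))))).length = s.length)) : ℤ) := by
  intro l
  induction l with
  | nil => intro acc; simp
  | cons x t ih =>
    intro acc
    simp only [List.foldl_cons, List.countP_cons]
    rw [ih]
    split_ifs with h1 h2 h3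
    · push_cast; ring
    · exact absurd (decide_eq_true h1) h2
    · exact absurd (of_decide_eq_true h3) h1
    · push_cast; ring

theorem calcInner_eq (m h : ℕ) (acc : Int) :
    calcInner (Nat.toDigits 10 m) ((h : ℤ)) acc
      = acc + (AcntP h (Nat.toDigits 10 h).length m : ℤ) := by
  unfold calcInner
  rw [calcInner_foldl]
  congr 1
  norm_cast
  set s := Nat.toDigits 10 m with hs
  set e := s.length with he
  rw [PySem.List.pyRange_one]
  rw [List.countP_map]
  unfold AcntP
  rw [List.range'_eq_map_range]
  rw [List.countP_map]
  have hcast : ((e : ℤ) - 1).toNat = e - 1 := by omega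
  rw [hcast]
  apply List.countP_congr
  intro k hk
  rw [List.mem_range] at hk
  simp only [Function.comp]
  have hneg : -((1 : ℤ) + (k : ℕ)) = -(((1 + k : ℕ) : ℤ)) := by push_cast; ring
  rw [hneg, PySem.List.slice_from_neg_natCast s (1 + k) (by omega),
    PySem.List.slice_to_neg_natCast s (1 + k) (by omega)]
  simp only [decide_eq_true_eq]
  have hlm : (Nat.toDigits 10 m).length = e := rfl
  have := cond_iff m h (1 + k) (by omega) (by omega)
  simp only at this
  rw [← hs] at this
  exact this

theorem toChars_nonneg (n : Int) (h : 0 ≤ n) :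
    PySem.Int.toChars n = Nat.toDigits 10 n.toNat := by
  simp [PySem.Int.toChars, not_lt.2 h]

theorem calcLoop_eq (high : Int) (hh : 0 ≤ high) :
    ∀ (n : ℕ) (low acc : Int), 0 ≤ low → n = (high - low).toNat →
    calcLoop low high acc = acc +
      (((List.range' low.toNat (high.toNat - low.toNat)).map
        (AcntP high.toNat (Nat.toDigits 10 high.toNat).length)).sum : ℤ) := by
  intro n
  induction n with
  | zero =>
    intro low acc h0 hn
    rw [calcLoop]
    rw [if_neg (by omega)]
    have hz : high.toNat - low.toNat = 0 := by omega
    rw [hz]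
    simp
  | succ k ih =>
    intro low acc h0 hn
    rw [calcLoop]
    rw [if_pos (by omega)]
    rw [ih (low + 1) _ (by omega) (by omega)]
    rw [toChars_nonneg low h0]
    have hcast : high = ((high.toNat : ℕ) : ℤ) := (Int.toNat_of_nonneg hh).symm
    rw [show calcInner (Nat.toDigits 10 low.toNat) high acc
        = calcInner (Nat.toDigits 10 low.toNat) ((high.toNat : ℕ) : ℤ) acc from by rw [← hcast]]
    rw [calcInner_eq low.toNat high.toNat acc]
    have hr : List.range' low.toNat (high.toNat - low.toNat)
        = low.toNat :: List.range' (low.toNat + 1) (high.toNat - (low.toNat + 1)) := by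
      have h1 : high.toNat - low.toNat = (high.toNat - (low.toNat + 1)) + 1 := by omega
      rw [h1, List.range'_succ]
    rw [hr]
    have h2 : (low + 1).toNat = low.toNat + 1 := by omega
    rw [h2]
    simp only [List.map_cons, List.sum_cons]
    push_cast
    ring

theorem dpLoop_congr (high d p d' p' : Int) (hp : 0 < p) (hp' : 0 < p')
    (hd : d = d') (hq : p = p') : dpLoop high d p hp = dpLoop high d' p' hp' := by
  subst hd; subst hq; rfl

theorem dpLoop_spec (high : Int) (hh : 1 ≤ high) :
    ∀ (n k : ℕ) (hp : (0:ℤ) < 10 ^ k), 1 ≤ k → (10:ℤ) ^ (k - 1) ≤ high →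
    high < (10:ℤ) ^ (k + n) →
    dpLoop high (k : ℤ) ((10:ℤ) ^ k) hp
      = (((Nat.toDigits 10 high.toNat).length : ℤ),
         (10:ℤ) ^ (Nat.toDigits 10 high.toNat).length) := by
  intro n
  induction n with
  | zero =>
    intro k hp hk1 hlo hhi
    simp only [Nat.add_zero] at hhi
    rw [dpLoop, if_neg (by omega)]
    have hc1 : ((10 ^ (k - 1) : ℕ) : ℤ) = (10:ℤ) ^ (k - 1) := by push_cast; norm_num
    have hc2 : ((10 ^ k : ℕ) : ℤ) = (10:ℤ) ^ k := by push_cast; norm_num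
    rw [lenD_eq_of high.toNat k (by omega) (by omega) (by omega)]
  | succ n ih =>
    intro k hp hk1 hlo hhi
    rw [dpLoop]
    by_cases hc : (10:ℤ) ^ k ≤ high
    · rw [if_pos hc]
      calc dpLoop high ((k:ℤ) + 1) ((10:ℤ) ^ k * 10) (by positivity)
          = dpLoop high (((k + 1 : ℕ)) : ℤ) ((10:ℤ) ^ (k + 1)) (by positivity) :=
            dpLoop_congr high _ _ _ _ _ _ (by push_cast; ring) (by ring)
        _ = _ := ih (k + 1) (by positivity) (by omega) (by simpa using hc)
            (by have he : k + 1 + n = k + (n + 1) := by omega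
                rw [he]; exact hhi)
    · rw [if_neg hc]
      have hc1 : ((10 ^ (k - 1) : ℕ) : ℤ) = (10:ℤ) ^ (k - 1) := by push_cast; norm_num
      have hc2 : ((10 ^ k : ℕ) : ℤ) = (10:ℤ) ^ k := by push_cast; norm_num
      rw [lenD_eq_of high.toNat k (by omega) (by omega) (by omega)]

theorem alt_fold (low high : Int) (h0 : 0 ≤ low) (hh : 1 ≤ high) :
    ∀ (j : ℕ), j ≤ (Nat.toDigits 10 high.toNat).length - 1 →
    (PySem.List.pyRange 1 (1 + (j : ℤ)) 1).foldl (fun st (_ : ℤ) =>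
      let q := st.2 * 10
      let r := PySem.Int.floordiv ((10:ℤ) ^ (Nat.toDigits 10 high.toNat).length) q
      let n := (PySem.Int.mod high r) * q + PySem.Int.floordiv high r
      (if n ≥ PySem.Int.floordiv ((10:ℤ) ^ (Nat.toDigits 10 high.toNat).length) 10 ∧
          low ≤ n ∧ n < high then st.1 + 1 else st.1, q))
      ((0 : Int), (1 : Int))
    = (((List.range' 1 j).countP (fun i =>
        decide (10 ^ ((Nat.toDigits 10 high.toNat).length - 1) ≤
            rotE (Nat.toDigits 10 high.toNat).length high.toNat
              ((Nat.toDigits 10 high.toNat).length - i) ∧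
          low.toNat ≤ rotE (Nat.toDigits 10 high.toNat).length high.toNat
              ((Nat.toDigits 10 high.toNat).length - i) ∧
          rotE (Nat.toDigits 10 high.toNat).length high.toNat
              ((Nat.toDigits 10 high.toNat).length - i) < high.toNat)) : ℤ),
       (10:ℤ) ^ j) := by
  set h := high.toNat with hsh
  set d := (Nat.toDigits 10 h).length with hsd
  have hd1 : 1 ≤ d := Nat.length_toDigits_pos
  have hdlt : h < 10 ^ d := (lenD_le_iff h d (by omega)).1 (by omega)
  intro j
  induction j with
  | zero =>
    intro _
    rw [PySem.List.pyRange_one_eq_nil (by omega)]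
    simp
  | succ j ih =>
    intro hj
    have hsplit : (1 : ℤ) + ((j + 1 : ℕ) : ℤ) = (1 + (j:ℤ)) + 1 := by push_cast; ring
    rw [hsplit, PySem.List.pyRange_one_succ_right (by omega), List.foldl_append,
      ih (by omega)]
    simp only [List.foldl_cons, List.foldl_nil]
    have hij : j + 1 ≤ d - 1 := hj
    have hq : (10:ℤ) ^ j * 10 = (10:ℤ) ^ (j + 1) := by ring
    have hrpos : (0:ℤ) < (10:ℤ) ^ (j + 1) := by positivity
    have hrdiv : PySem.Int.floordiv ((10:ℤ) ^ d) ((10:ℤ) ^ (j + 1))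
        = (10:ℤ) ^ (d - (j + 1)) := by
      rw [PySem.Int.floordiv_eq_ediv_of_pos hrpos]
      have hfac : (10:ℤ) ^ d = (10:ℤ) ^ (d - (j + 1)) * (10:ℤ) ^ (j + 1) := by
        rw [← pow_add]; congr 1; omega
      rw [hfac, Int.mul_ediv_cancel _ (by positivity)]
    have hr2 : PySem.Int.floordiv ((10:ℤ) ^ d) 10 = (10:ℤ) ^ (d - 1) := by
      rw [PySem.Int.floordiv_eq_ediv_of_pos (by norm_num)]
      have hfac : (10:ℤ) ^ d = (10:ℤ) ^ (d - 1) * 10 := by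
        conv_lhs => rw [show d = (d - 1) + 1 from by omega]
        rw [pow_succ]
      rw [hfac, Int.mul_ediv_cancel _ (by norm_num)]
    have hhcast : high = ((h : ℕ) : ℤ) := by omega
    have hmodc : PySem.Int.mod high ((10:ℤ) ^ (d - (j + 1)))
        = ((h % 10 ^ (d - (j + 1)) : ℕ) : ℤ) := by
      rw [PySem.Int.mod_eq_emod_of_pos (by positivity), hhcast]
      push_cast
      rfl
    have hdivc : PySem.Int.floordiv high ((10:ℤ) ^ (d - (j + 1)))
        = ((h / 10 ^ (d - (j + 1)) : ℕ) : ℤ) := by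
      rw [PySem.Int.floordiv_eq_ediv_of_pos (by positivity), hhcast]
      push_cast
      rfl
    simp only [hq, hrdiv, hr2, hmodc, hdivc]
    have hn : ((h % 10 ^ (d - (j + 1)) : ℕ) : ℤ) * (10:ℤ) ^ (j + 1)
        + ((h / 10 ^ (d - (j + 1)) : ℕ) : ℤ)
        = ((rotE d h (d - (j + 1)) : ℕ) : ℤ) := by
      unfold rotE
      have : d - (d - (j + 1)) = j + 1 := by omega
      rw [this]
      push_cast
      norm_num
    rw [hn]
    have hrange : List.range' 1 (j + 1) = List.range' 1 j ++ [1 + j] := by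
      rw [List.range'_concat]
      simp
    rw [hrange, List.countP_append]
    simp only [List.countP_cons, List.countP_nil]
    have hcond : ((rotE d h (d - (j + 1)) : ℕ) : ℤ) ≥ (10:ℤ) ^ (d - 1) ∧
          low ≤ ((rotE d h (d - (j + 1)) : ℕ) : ℤ) ∧
          ((rotE d h (d - (j + 1)) : ℕ) : ℤ) < high
        ↔ (10 ^ (d - 1) ≤ rotE d h (d - (1 + j)) ∧
          low.toNat ≤ rotE d h (d - (1 + j)) ∧ rotE d h (d - (1 + j)) < h) := by
      have hji : 1 + j = j + 1 := by omega
      rw [hji]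
      have hc1 : ((10 ^ (d - 1) : ℕ) : ℤ) = (10:ℤ) ^ (d - 1) := by push_cast; norm_num
      omega
    split_ifs with h1 h2 h3
    · simp only [Prod.mk.injEq]
      exact ⟨by push_cast; ring, trivial⟩
    · exact absurd (decide_eq_true (hcond.1 h1)) (by simpa using h2)
    · exact absurd (of_decide_eq_true (by simpa using h3)) (fun hc => h1 (hcond.2 hc))
    · simp only [Prod.mk.injEq]
      exact ⟨by push_cast; ring, trivial⟩

theorem calculate_alt_eq (low high : Int) (h0 : 0 ≤ low) (hlh : low < high) :
    calculate_alt low high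
      = ((Bcnt high.toNat (Nat.toDigits 10 high.toNat).length low.toNat : ℕ) : ℤ) := by
  have hh : 1 ≤ high := by omega
  set h := high.toNat with hsh
  set dN := (Nat.toDigits 10 h).length with hsd
  have hd1 : 1 ≤ dN := Nat.length_toDigits_pos
  unfold calculate_alt
  rw [if_neg (by omega)]
  have hbig : high < (10:ℤ) ^ (1 + h) := by
    have h1 : h < 10 ^ h := Nat.lt_pow_self (by norm_num)
    have h2 : (10:ℕ) ^ h ≤ 10 ^ (1 + h) := Nat.pow_le_pow_right (by norm_num) (by omega)
    have : ((10 ^ (1 + h) : ℕ) : ℤ) = (10:ℤ) ^ (1 + h) := by push_cast; norm_num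
    omega
  have hstart : dpLoop high 1 10 (by norm_num)
      = dpLoop high (((1 : ℕ)) : ℤ) ((10:ℤ) ^ (1 : ℕ)) (by positivity) :=
    dpLoop_congr high _ _ _ _ _ _ (by norm_num) (by norm_num)
  rw [hstart, dpLoop_spec high hh h 1 (by positivity) (le_refl 1) (by simpa using hh) hbig]
  simp only
  have hdexp : (dN : ℤ) = 1 + ((dN - 1 : ℕ) : ℤ) := by omega
  rw [hdexp, alt_fold low high h0 hh (dN - 1) (le_refl _)]
  rfl

theorem main_eq (low high : Int) (hPre : 0 ≤ low ∨ high ≤ low) :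
    calculate low high = calculate_alt low high := by
  by_cases hlh : low < high
  · have h0 : 0 ≤ low := by omega
    have hh : 0 ≤ high := by omega
    set h := high.toNat with hsh
    set dN := (Nat.toDigits 10 h).length with hsd
    have hd1 : 1 ≤ dN := Nat.length_toDigits_pos
    have hdlt : h < 10 ^ dN := (lenD_le_iff h dN (by omega)).1 (by omega)
    unfold calculate
    rw [calcLoop_eq high hh ((high - low).toNat) low 0 h0 rfl]
    rw [sum_eq_Bcnt h dN hdlt hd1 (h - low.toNat) low.toNat rfl]
    rw [calculate_alt_eq low high h0 hlh, zero_add]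
  · unfold calculate
    rw [calcLoop, if_neg hlh]
    unfold calculate_alt
    rw [if_pos (by omega)]

-- ===== VERDICT (by name: the statement is the Claim_ definition above) =====
theorem calculate_spec : Claim_equal_calculate := by
  intro low high _ hPre
  unfold Spec_calculate
  exact main_eq low high hPre
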